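-- pv_equiv track=rewrite | github.com/attractive-boy/security-check | securityCheck/views.py | calculate_moist_heat_level
-- ===== SOURCE A (Python) =====
-- def calculate_moist_heat_level(environment_score):
--     # 湿热强度等级表
--     level_table = {
--         '一级湿热': (0, 1),
--         '二级湿热': (1, 2),
--         '三级湿热': (2, 3),
--         '四级湿热': (3, 4),
--         '五级湿热': (4, 5)
--     }
--
--     # 根据湿热强度总分确定湿热强度等级
--     for level, (lower_bound, upper_bound) in level_table.items():
--         if lower_bound <= environment_score < upper_bound:
--             return level
--
--     # 如果总分不在任何等级范围内，默认返回最高等级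
--     return '五级湿热'
-- ===== SOURCE B (Python) =====
-- def calculate_moist_heat_level(environment_score):
--     levels = ['一级湿热', '二级湿热', '三级湿热', '四级湿热', '五级湿热']
--     if 0 <= environment_score < 5:
--         return levels[int(environment_score)]
--     return '五级湿热'
-- ===== Notes on version B (the rewrite author's own statement) =====
-- stated objective: simpler
-- what changed: Replaces the linear scan over a five-entry range table with a single range guard and a direct index into an ordered list of level names.
import Mathlib
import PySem

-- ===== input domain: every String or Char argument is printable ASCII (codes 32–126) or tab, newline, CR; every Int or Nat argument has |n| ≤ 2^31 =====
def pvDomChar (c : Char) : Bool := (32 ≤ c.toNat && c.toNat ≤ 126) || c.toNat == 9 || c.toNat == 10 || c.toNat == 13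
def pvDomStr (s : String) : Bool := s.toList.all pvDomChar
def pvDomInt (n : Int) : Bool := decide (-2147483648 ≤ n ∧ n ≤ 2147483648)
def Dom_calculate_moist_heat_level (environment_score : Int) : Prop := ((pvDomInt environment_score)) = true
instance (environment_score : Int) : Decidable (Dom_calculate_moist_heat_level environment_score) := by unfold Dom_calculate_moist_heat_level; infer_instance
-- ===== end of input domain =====

-- B replaces A's linear scan over the range table with a range guard and a direct list index (simpler).


-- ===== PORT A =====
-- the for-loop over level_table.items(): first matching range wins, else fall through
def pvALoop (items : List (String × Int × Int)) (s : Int) : String :=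
  match items with
  | [] => "五级湿热"
  | (level, lo, hi) :: rest => if lo ≤ s ∧ s < hi then level else pvALoop rest s

def calculate_moist_heat_level (environment_score : Int) : String :=
  pvALoop [("一级湿热", 0, 1), ("二级湿热", 1, 2), ("三级湿热", 2, 3),
           ("四级湿热", 3, 4), ("五级湿热", 4, 5)] environment_score

-- ===== PORT B =====
def calculate_moist_heat_level_alt (environment_score : Int) : String :=
  let levels := ["一级湿热", "二级湿热", "三级湿热", "四级湿热", "五级湿热"]
  if 0 ≤ environment_score ∧ environment_score < 5 then
    levels.getD environment_score.toNat "五级湿热"  -- int(s) = s on Int; in-range index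
  else "五级湿热"

-- ===== PRECONDITION & SPEC =====
def Spec_calculate_moist_heat_level (environment_score : Int) (out : String) : Prop := out = calculate_moist_heat_level_alt environment_score
instance (environment_score : Int) (out : String) : Decidable (Spec_calculate_moist_heat_level environment_score out) := by unfold Spec_calculate_moist_heat_level; infer_instance

-- ===== CLAIM (what is proved, stated in full; the proofs are below) =====
def Claim_equal_calculate_moist_heat_level : Prop := ∀ (environment_score : Int), Dom_calculate_moist_heat_level environment_score → Spec_calculate_moist_heat_level environment_score (calculate_moist_heat_level environment_score)

-- ===== LEMMAS AND PROOFS =====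

-- ===== VERDICT (by name: the statement is the Claim_ definition above) =====
theorem calculate_moist_heat_level_spec : Claim_equal_calculate_moist_heat_level := by
  intro s _
  unfold Spec_calculate_moist_heat_level
  by_cases h : 0 ≤ s ∧ s < 5
  · obtain ⟨h0, h5⟩ := h
    interval_cases s <;> decide
  · have h0 : ¬ (0 ≤ s ∧ s < 1) := by omega
    have h1 : ¬ (1 ≤ s ∧ s < 2) := by omega
    have h2 : ¬ (2 ≤ s ∧ s < 3) := by omega
    have h3 : ¬ (3 ≤ s ∧ s < 4) := by omega
    have h4 : ¬ (4 ≤ s ∧ s < 5) := by omega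
    simp only [calculate_moist_heat_level, calculate_moist_heat_level_alt, pvALoop,
      if_neg h, if_neg h0, if_neg h1, if_neg h2, if_neg h3, if_neg h4]
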